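-- pv_equiv track=rewrite | github.com/TheCoderFish/leetcode | codeforces/1433a.py | get_keypress_count
-- ===== SOURCE A (Python) =====
-- max_powers = [0, 1, 2, 3]
--
-- def get_boring_series(start, stop_number):
--     series = []
--     sum = 0
--     for i in max_powers:
--         generated = (start * 10 ** i)
--
--         series.append(generated + sum)
--         if stop_number == generated + sum:
--             return series
--         sum += generated
--
--     return series
--
-- def get_keypress_count(stop_number):
--     all = []
--     for i in range(1, 10):
--         series = get_boring_series(i, stop_number)
--         all.extend(series)
--         if stop_number in series:
--             break
--
--     answer = 0
--     for x in all:
--         answer += count_number_of_digits(x)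
--     return answer
--
-- def count_number_of_digits(number):
--     return len(list(str(number)))
-- ===== SOURCE B (Python) =====
-- def get_keypress_count(stop_number):
--     # closed form: stop_number is reachable iff it is d * rep where rep is a
--     # repunit of length 1..4 and 1 <= d <= 9; then answer is 10 per earlier
--     # digit plus 1+2+...+len; otherwise all nine series are typed fully (90).
--     for k, rep in enumerate((1, 11, 111, 1111)):
--         d, r = divmod(stop_number, rep)
--         if r == 0 and 1 <= d <= 9:
--             return (d - 1) * 10 + (k + 1) * (k + 2) // 2
--     return 90
-- ===== Notes on version B (the rewrite author's own statement) =====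
-- stated objective: simpler
-- what changed: Replaces building the nine boring series and summing str()-digit counts over all collected entries with a closed form: four divmod tests recognise stop_number as a repdigit d*repunit and return the keypress count arithmetically, with a constant default otherwise.
import Mathlib
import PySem

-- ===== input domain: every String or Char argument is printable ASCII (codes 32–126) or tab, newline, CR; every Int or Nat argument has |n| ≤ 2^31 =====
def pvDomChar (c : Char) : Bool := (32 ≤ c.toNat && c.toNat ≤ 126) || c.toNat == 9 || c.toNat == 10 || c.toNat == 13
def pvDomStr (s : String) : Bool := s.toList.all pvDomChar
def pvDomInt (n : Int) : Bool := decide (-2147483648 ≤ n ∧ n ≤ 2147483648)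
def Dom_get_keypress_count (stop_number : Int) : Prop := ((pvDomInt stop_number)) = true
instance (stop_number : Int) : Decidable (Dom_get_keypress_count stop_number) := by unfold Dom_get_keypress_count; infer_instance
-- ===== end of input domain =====

-- B replaces A's build-all-nine-series-and-count scan with a closed form over the
-- four repunits (objective: simpler).

-- ===== PORT A =====
def max_powers : List Int := [0, 1, 2, 3]

-- len(list(str(number)))
def count_number_of_digits (number : Int) : Int :=
  ((PySem.Int.toStr number).toList).length

-- the for-loop of get_boring_series, with its early return
def gbs_go (start stop_number : Int) : List Int → List Int → Int → List Int
  | [], series, _ => series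
  | i :: rest, series, sum =>
    -- exponents in max_powers are the nonnegative literals 0..3, so .toNat is exact here
    let generated := start * 10 ^ i.toNat
    let series' := series ++ [generated + sum]
    if stop_number = generated + sum then series'
    else gbs_go start stop_number rest series' (sum + generated)

def get_boring_series (start stop_number : Int) : List Int :=
  gbs_go start stop_number max_powers [] 0

-- the for-loop of get_keypress_count, with its break
def gkc_go (stop_number : Int) : List Int → List Int → List Int
  | [], all => all
  | i :: rest, all =>
    let series := get_boring_series i stop_number
    let all' := all ++ series
    if stop_number ∈ series then all' else gkc_go stop_number rest all'

def get_keypress_count (stop_number : Int) : Int :=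
  let all := gkc_go stop_number (PySem.List.pyRange 1 10 1) []
  all.foldl (fun answer x => answer + count_number_of_digits x) 0

-- ===== PORT B =====
-- the for-loop over enumerate((1, 11, 111, 1111)), with its early return
def gkc_alt_go (stop_number : Int) : List (Int × Int) → Int
  | [] => 90
  | (k, rep) :: rest =>
    let d := PySem.Int.floordiv stop_number rep
    let r := PySem.Int.mod stop_number rep
    if r = 0 ∧ 1 ≤ d ∧ d ≤ 9 then
      (d - 1) * 10 + PySem.Int.floordiv ((k + 1) * (k + 2)) 2
    else gkc_alt_go stop_number rest

def get_keypress_count_alt (stop_number : Int) : Int :=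
  gkc_alt_go stop_number [(0, 1), (1, 11), (2, 111), (3, 1111)]

-- ===== PRECONDITION & SPEC =====
def Spec_get_keypress_count (stop_number : Int) (out : Int) : Prop := out = get_keypress_count_alt stop_number
instance (stop_number : Int) (out : Int) : Decidable (Spec_get_keypress_count stop_number out) := by unfold Spec_get_keypress_count; infer_instance

-- ===== CLAIM (what is proved, stated in full; the proofs are below) =====
def Claim_equal_get_keypress_count : Prop := ∀ (stop_number : Int), Dom_get_keypress_count stop_number → Spec_get_keypress_count stop_number (get_keypress_count stop_number)

-- ===== LEMMAS AND PROOFS =====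

-- the 36 numbers a series entry can equal
def pvHits : List Int :=
  [1,2,3,4,5,6,7,8,9, 11,22,33,44,55,66,77,88,99,
   111,222,333,444,555,666,777,888,999, 1111,2222,3333,4444,5555,6666,7777,8888,9999]

theorem pv_eq_of_mem (n : Int) (hn : n ∈ pvHits) :
    get_keypress_count n = get_keypress_count_alt n := by
  fin_cases hn <;> decide

theorem pv_eq_of_not_mem (n : Int) (hn : n ∉ pvHits) :
    get_keypress_count n = get_keypress_count_alt n := by
  simp only [pvHits, List.mem_cons, List.not_mem_nil, or_false, not_or] at hn
  obtain ⟨h1,h2,h3,h4,h5,h6,h7,h8,h9,h10,h11,h12,h13,h14,h15,h16,h17,h18,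
          h19,h20,h21,h22,h23,h24,h25,h26,h27,h28,h29,h30,h31,h32,h33,h34,h35,h36⟩ := hn
  have hA : get_keypress_count n = 90 := by
    norm_num [get_keypress_count, gkc_go, get_boring_series, gbs_go, max_powers,
      PySem.List.pyRange_one_cons, PySem.List.pyRange_one_eq_nil, count_number_of_digits,
      show (0:Int).toNat = 0 from rfl, show (1:Int).toNat = 1 from rfl,
      show (2:Int).toNat = 2 from rfl, show (3:Int).toNat = 3 from rfl,
      h1,h2,h3,h4,h5,h6,h7,h8,h9,h10,h11,h12,h13,h14,h15,h16,h17,h18,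
      h19,h20,h21,h22,h23,h24,h25,h26,h27,h28,h29,h30,h31,h32,h33,h34,h35,h36]
    decide
  have hB : get_keypress_count_alt n = 90 := by
    have e1 : PySem.Int.floordiv n 1 = n / 1 := PySem.Int.floordiv_eq_ediv_of_pos (by norm_num)
    have e11 : PySem.Int.floordiv n 11 = n / 11 := PySem.Int.floordiv_eq_ediv_of_pos (by norm_num)
    have e111 : PySem.Int.floordiv n 111 = n / 111 := PySem.Int.floordiv_eq_ediv_of_pos (by norm_num)
    have e1111 : PySem.Int.floordiv n 1111 = n / 1111 := PySem.Int.floordiv_eq_ediv_of_pos (by norm_num)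
    have m1 : PySem.Int.mod n 1 = n % 1 := PySem.Int.mod_eq_emod_of_pos (by norm_num)
    have m11 : PySem.Int.mod n 11 = n % 11 := PySem.Int.mod_eq_emod_of_pos (by norm_num)
    have m111 : PySem.Int.mod n 111 = n % 111 := PySem.Int.mod_eq_emod_of_pos (by norm_num)
    have m1111 : PySem.Int.mod n 1111 = n % 1111 := PySem.Int.mod_eq_emod_of_pos (by norm_num)
    simp only [get_keypress_count_alt, gkc_alt_go, e1, e11, e111, e1111, m1, m11, m111, m1111]
    rw [if_neg, if_neg, if_neg, if_neg] <;> omega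
  rw [hA, hB]

-- ===== VERDICT (by name: the statement is the Claim_ definition above) =====
theorem get_keypress_count_spec : Claim_equal_get_keypress_count := by
  intro n _
  unfold Spec_get_keypress_count
  by_cases hn : n ∈ pvHits
  · exact pv_eq_of_mem n hn
  · exact pv_eq_of_not_mem n hn
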